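-- pv_equiv track=rewrite | github.com/AnthonyCongHieu/EatFitAI_v1 | ai-provider/dataset_v2/kaggle_public_drive_raw_audit_kernel.py | strip_cache_archive_suffixes
-- ===== SOURCE A (Python) =====
-- CACHE_WRAPPER_SUFFIX = ".zip.cache"
--
-- def strip_cache_archive_suffixes(name: str) -> str:
--     lowered = name.lower()
--     for suffix in (CACHE_WRAPPER_SUFFIX, ".cache"):
--         if lowered.endswith(suffix):
--             name = name[: -len(suffix)]
--             lowered = name.lower()
--             break
--     while lowered.endswith(".zip"):
--         name = name[:-4]
--         lowered = name.lower()
--     return name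
-- ===== SOURCE B (Python) =====
-- import re
--
-- # One case-insensitive regex for the whole removable tail: any run of ".zip"
-- # repetitions followed by at most one cache suffix, anchored at the end.
-- _TRAILING = re.compile(r"(?:\.zip)*(?:\.zip\.cache|\.cache)?\Z", re.IGNORECASE)
--
-- def strip_cache_archive_suffixes(name: str) -> str:
--     return name[:_TRAILING.search(name).start()]
-- ===== Notes on version B (the rewrite author's own statement) =====
-- stated objective: idiomatic
-- what changed: A's two-phase suffix stripping (a for-loop cutting one '.zip.cache'/'.cache' suffix, then a while-loop repeatedly cutting '.zip') is replaced by a single case-insensitive regular expression that locates the whole removable tail in one search and slices it off.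
import Mathlib
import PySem

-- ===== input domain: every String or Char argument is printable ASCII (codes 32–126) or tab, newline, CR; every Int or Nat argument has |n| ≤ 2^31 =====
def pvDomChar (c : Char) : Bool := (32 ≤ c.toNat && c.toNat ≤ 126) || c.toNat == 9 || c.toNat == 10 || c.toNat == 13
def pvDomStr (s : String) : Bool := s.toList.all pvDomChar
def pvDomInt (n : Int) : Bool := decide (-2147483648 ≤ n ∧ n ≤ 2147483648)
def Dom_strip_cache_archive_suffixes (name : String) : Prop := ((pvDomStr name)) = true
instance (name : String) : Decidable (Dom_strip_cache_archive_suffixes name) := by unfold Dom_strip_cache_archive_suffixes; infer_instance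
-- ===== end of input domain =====

-- B replaces A's two-phase strip (one cache suffix, then a while-loop of ".zip" strips) by a single
-- case-insensitive regex for the whole removable tail; objective: idiomatic (same cost).

-- ===== PORT A =====

-- termination helper for A's while-loop: name[:-4] is strictly shorter when lowered ends with ".zip"
theorem pvSliceNeg4_lt (name : String)
    (h : PySem.Str.endswith (PySem.Str.lower name) ".zip" = true) :
    (PySem.Str.slice name none (some (-4))).toList.length < name.toList.length := by
  rw [PySem.Str.endswith_eq] at h
  have hs := (PySem.Chars.endswith_iff _ _).mp h
  have hlen : 4 ≤ name.toList.length := by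
    have h4 := hs.length_le
    simpa [PySem.Str.toList_lower, PySem.Chars.lower] using h4
  rw [PySem.Str.toList_slice, PySem.Chars.slice_eq_listSlice,
      PySem.List.slice_to_neg_ofNat _ 4 (by omega)]
  rw [List.length_take]
  omega

-- A's 'while lowered.endswith(".zip"): name = name[:-4]; lowered = name.lower()'
def pvStripZipLoop (name : String) : String :=
  if h : PySem.Str.endswith (PySem.Str.lower name) ".zip" = true then
    pvStripZipLoop (PySem.Str.slice name none (some (-4)))
  else name
termination_by name.toList.length
decreasing_by exact pvSliceNeg4_lt name h

def strip_cache_archive_suffixes (name : String) : String :=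
  let lowered := PySem.Str.lower name
  -- the for-loop over (".zip.cache", ".cache") with break: at most one suffix is cut
  let name1 :=
    if PySem.Str.endswith lowered ".zip.cache" then PySem.Str.slice name none (some (-10))
    else if PySem.Str.endswith lowered ".cache" then PySem.Str.slice name none (some (-6))
    else name
  pvStripZipLoop name1

-- ===== PORT B =====

-- Source B matches the regex (?:\.zip)*(?:\.zip\.cache|\.cache)?\Z  with re.IGNORECASE.
-- pvMatchEnd l: the anchored pattern matches exactly the (lowered) text l —
-- the alternation and the greedy star are transcribed branch by branch.
def pvMatchEnd (l : List Char) : Bool :=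
  if l = [] then true
  else if l = ".cache".toList then true
  else if l = ".zip.cache".toList then true
  else if l.take 4 = ".zip".toList then pvMatchEnd (l.drop 4)
  else false
termination_by l.length
decreasing_by
  simp only [List.length_drop]
  have h4 : l.take 4 = ".zip".toList := by assumption
  have hl : (l.take 4).length = 4 := by rw [h4]; rfl
  rw [List.length_take] at hl
  omega

-- re.search: leftmost position at which the (end-anchored) pattern matches; IGNORECASE = match on the lowered text
def pvSearchStart : List Char → Nat
  | [] => 0
  | l@(_ :: t) => if pvMatchEnd l then 0 else pvSearchStart t + 1

def strip_cache_archive_suffixes_alt (name : String) : String :=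
  String.ofList (name.toList.take (pvSearchStart (PySem.Chars.lower name.toList)))

-- ===== PRECONDITION & SPEC =====
def Spec_strip_cache_archive_suffixes (name : String) (out : String) : Prop := out = strip_cache_archive_suffixes_alt name
instance (name : String) (out : String) : Decidable (Spec_strip_cache_archive_suffixes name out) := by unfold Spec_strip_cache_archive_suffixes; infer_instance

-- ===== CLAIM (what is proved, stated in full; the proofs are below) =====
def Claim_equal_strip_cache_archive_suffixes : Prop := ∀ (name : String), Dom_strip_cache_archive_suffixes name → Spec_strip_cache_archive_suffixes name (strip_cache_archive_suffixes name)

-- ===== LEMMAS AND PROOFS =====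

def pvZipRep : Nat → List Char
  | 0 => []
  | k + 1 => ".zip".toList ++ pvZipRep k
theorem pvZipRep_snoc (k : Nat) : pvZipRep (k + 1) = pvZipRep k ++ ".zip".toList := by
  induction k with
  | zero => rfl
  | succ k ih =>
      calc pvZipRep (k + 2) = ".zip".toList ++ pvZipRep (k + 1) := rfl
        _ = ".zip".toList ++ (pvZipRep k ++ ".zip".toList) := by rw [ih]
        _ = pvZipRep (k + 1) ++ ".zip".toList := by simp [pvZipRep]
theorem pvZipRep_length (k : Nat) : (pvZipRep k).length = 4 * k := by
  induction k with
  | zero => rfl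
  | succ k ih => simp [pvZipRep, ih]; omega
def pvZCount (l : List Char) : Nat :=
  if h : PySem.Chars.endswith l ".zip".toList = true then
    pvZCount (l.take (l.length - 4)) + 1
  else 0
termination_by l.length
decreasing_by
  have hs := (PySem.Chars.endswith_iff _ _).mp h
  have h4 : 4 ≤ l.length := by simpa using hs.length_le
  simp [List.length_take]; omega
theorem pvZCount_bound (l : List Char) : 4 * pvZCount l ≤ l.length := by
  induction l using pvZCount.induct with
  | case1 l h ih =>
      have hs := (PySem.Chars.endswith_iff _ _).mp h
      have h4 : 4 ≤ l.length := by simpa using hs.length_le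
      rw [pvZCount, dif_pos h]
      rw [List.length_take] at ih
      omega
  | case2 l h => rw [pvZCount, dif_neg h]; omega

theorem pvZCount_decomp (l : List Char) :
    l.take (l.length - 4 * pvZCount l) ++ pvZipRep (pvZCount l) = l := by
  induction l using pvZCount.induct with
  | case1 l h ih =>
      have hs := (PySem.Chars.endswith_iff _ _).mp h
      have h4 : 4 <= l.length := by simpa using hs.length_le
      obtain ⟨t, ht⟩ := hs
      have htl : t.length = l.length - 4 := by
        have := congrArg List.length ht
        simp at this; omega
      have htake : l.take (l.length - 4) = t := by
        rw [← ht]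
        have hlen2 : (t ++ ".zip".toList).length - 4 = t.length := by simp
        rw [hlen2, List.take_left]
      rw [htake] at ih
      have hb : 4 * pvZCount t <= t.length := pvZCount_bound t
      rw [pvZCount, dif_pos h, htake, pvZipRep_snoc, ← List.append_assoc]
      conv_rhs => rw [← ht]
      congr 1
      have harith : l.length - 4 * (pvZCount t + 1) = t.length - 4 * pvZCount t := by omega
      rw [harith]
      have hTT : l.take (t.length - 4 * pvZCount t) = t.take (t.length - 4 * pvZCount t) := by
        conv_rhs => rw [← htake]
        rw [List.take_take]
        congr 1
        have hc : (List.take (l.length - 4) l).length = t.length := by rw [htake]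
        have hd : pvZCount (List.take (l.length - 4) l) = pvZCount t := by rw [htake]
        omega
      rw [hTT]
      exact ih
  | case2 l h => rw [pvZCount, dif_neg h]; simp [pvZipRep]

theorem pvZCount_snoc (x : List Char) : pvZCount (x ++ ".zip".toList) = pvZCount x + 1 := by
  have h : PySem.Chars.endswith (x ++ ".zip".toList) ".zip".toList = true :=
    (PySem.Chars.endswith_iff _ _).mpr ⟨x, rfl⟩
  rw [pvZCount, dif_pos h]
  have hlen2 : (x ++ ".zip".toList).length - 4 = x.length := by simp
  rw [hlen2, List.take_left]

theorem pvZipRep_suffix_le (k : Nat) (l : List Char) (h : pvZipRep k <:+ l) : k <= pvZCount l := by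
  induction k generalizing l with
  | zero => omega
  | succ k ih =>
      rw [pvZipRep_snoc] at h
      obtain ⟨t, ht⟩ := h
      rw [← List.append_assoc] at ht
      have hz : PySem.Chars.endswith l ".zip".toList = true :=
        (PySem.Chars.endswith_iff _ _).mpr ⟨t ++ pvZipRep k, ht⟩
      rw [pvZCount, dif_pos hz]
      have htake : l.take (l.length - 4) = t ++ pvZipRep k := by
        rw [← ht]
        have hl2 : (t ++ pvZipRep k ++ ".zip".toList).length - 4 = (t ++ pvZipRep k).length := by
          simp; omega
        rw [hl2, List.take_left]
      rw [htake]
      have := ih (t ++ pvZipRep k) ⟨t, rfl⟩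
      omega

theorem pvMatchEnd_zipRep (k : Nat) : pvMatchEnd (pvZipRep k) = true := by
  induction k with
  | zero => show pvMatchEnd [] = true; rw [pvMatchEnd]; simp
  | succ k ih =>
      have hlen : (pvZipRep (k+1)).length = 4 * (k+1) := pvZipRep_length (k+1)
      have hne : pvZipRep (k + 1) ≠ [] := by
        intro h; rw [h] at hlen; simp at hlen
      have hnc : pvZipRep (k + 1) ≠ ".cache".toList := by
        intro h; rw [h] at hlen; simp at hlen; omega
      have hnzc : pvZipRep (k + 1) ≠ ".zip.cache".toList := by
        intro h; rw [h] at hlen; simp at hlen; omega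
      have htk : (pvZipRep (k+1)).take 4 = ".zip".toList := by
        show ((".zip".toList) ++ pvZipRep k).take 4 = ".zip".toList
        exact List.take_left' rfl
      have hdr : (pvZipRep (k+1)).drop 4 = pvZipRep k := by
        show ((".zip".toList) ++ pvZipRep k).drop 4 = pvZipRep k
        exact List.drop_left' rfl
      rw [pvMatchEnd, if_neg hne, if_neg hnc, if_neg hnzc, if_pos htk, hdr]
      exact ih

theorem pvMatchEnd_zipRep_cache (k : Nat) :
    pvMatchEnd (pvZipRep k ++ ".cache".toList) = true := by
  induction k with
  | zero =>
      show pvMatchEnd ([] ++ ".cache".toList) = true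
      rw [List.nil_append, pvMatchEnd]; simp
  | succ k ih =>
      set l := pvZipRep (k+1) ++ ".cache".toList with hl
      have hlen : l.length = 4 * (k+1) + 6 := by
        rw [hl]; simp [pvZipRep_length]
      by_cases hzc : l = ".zip.cache".toList
      · rw [pvMatchEnd]; simp [hzc]
      · have hne : l ≠ [] := by intro h; rw [h] at hlen; simp at hlen
        have hnc : l ≠ ".cache".toList := by
          intro h; rw [h] at hlen; simp at hlen
        have htk : l.take 4 = ".zip".toList := by
          rw [hl]
          show ((".zip".toList ++ pvZipRep k) ++ ".cache".toList).take 4 = ".zip".toList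
          rw [List.append_assoc]
          exact List.take_left' rfl
        have hdr : l.drop 4 = pvZipRep k ++ ".cache".toList := by
          rw [hl]
          show ((".zip".toList ++ pvZipRep k) ++ ".cache".toList).drop 4 = _
          rw [List.append_assoc]
          exact List.drop_left' rfl
        rw [pvMatchEnd, if_neg hne, if_neg hnc, if_neg hzc, if_pos htk, hdr]
        exact ih

theorem pvMatchEnd_complete (l : List Char) :
    pvMatchEnd l = true → ∃ k, l = pvZipRep k ∨ l = pvZipRep k ++ ".cache".toList := by
  induction l using pvMatchEnd.induct with
  | case1 => intro _; exact ⟨0, Or.inl rfl⟩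
  | case2 _ => intro _; exact ⟨0, Or.inr (by decide)⟩
  | case3 _ _ => intro _; exact ⟨1, Or.inr (by decide)⟩
  | case4 l h1 h2 h3 h4 ih =>
      intro h
      rw [pvMatchEnd, if_neg h1, if_neg h2, if_neg h3, if_pos h4] at h
      obtain ⟨k, hk⟩ := ih h
      refine ⟨k + 1, ?_⟩
      have hsplit : l = ".zip".toList ++ l.drop 4 := by
        conv_lhs => rw [← List.take_append_drop 4 l, h4]
      rcases hk with hk | hk
      · exact Or.inl (by rw [hsplit, hk]; rfl)
      · exact Or.inr (by rw [hsplit, hk]; simp [pvZipRep])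
  | case5 l h1 h2 h3 h4 =>
      intro h
      rw [pvMatchEnd, if_neg h1, if_neg h2, if_neg h3, if_neg h4] at h
      exact absurd h (by simp)
theorem pvCache_zip_clash (k : Nat) (l : List Char)
    (hc : ".cache".toList <:+ l) (hz : pvZipRep (k + 1) <:+ l) : False := by
  have hzip : ".zip".toList <:+ l := by
    rw [pvZipRep_snoc] at hz
    exact (List.suffix_append (pvZipRep k) ".zip".toList).trans hz
  rcases List.suffix_or_suffix_of_suffix hzip hc with h | h
  · exact absurd h (by decide)
  · have := h.length_le; simp at this

theorem pvSearchStart_eq (l : List Char) (p : Nat)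
    (hp : pvMatchEnd (l.drop p) = true)
    (hmin : ∀ q, q < p → pvMatchEnd (l.drop q) = false) : pvSearchStart l = p := by
  induction l generalizing p with
  | nil =>
      rcases Nat.eq_zero_or_pos p with h | h
      · simp [pvSearchStart, h]
      · have := hmin 0 h
        rw [List.drop_nil] at this
        rw [show pvMatchEnd [] = true by rw [pvMatchEnd]; simp] at this
        exact absurd this (by simp)
  | cons c t ih =>
      by_cases h : pvMatchEnd (c :: t) = true
      · rcases Nat.eq_zero_or_pos p with h0 | h0
        · simp [pvSearchStart, h, h0]
        · have := hmin 0 h0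
          rw [List.drop_zero] at this
          rw [h] at this; exact absurd this (by simp)
      · have hp0 : p ≠ 0 := by
          intro h0; rw [h0, List.drop_zero] at hp; exact h hp
        obtain ⟨p', rfl⟩ : ∃ p', p = p' + 1 := ⟨p - 1, by omega⟩
        have heq : pvSearchStart (c :: t) = pvSearchStart t + 1 := by
          simp [pvSearchStart, h]
        rw [heq, ih p' (by simpa using hp) (fun q hq => by simpa using hmin (q + 1) (by omega))]

theorem pvSearch_cache (low t0 : List Char) (z : Nat)
    (hdecomp : low = t0 ++ pvZipRep z ++ ".cache".toList)
    (hz : pvZCount (t0 ++ pvZipRep z) = z) :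
    pvSearchStart low = t0.length := by
  have hc : ".cache".toList <:+ low := ⟨t0 ++ pvZipRep z, by rw [hdecomp, List.append_assoc]⟩
  have hlen : low.length = t0.length + 4 * z + 6 := by
    rw [hdecomp]; simp [pvZipRep_length]; omega
  have hp : pvMatchEnd (low.drop t0.length) = true := by
    have hd : low.drop t0.length = pvZipRep z ++ ".cache".toList := by
      rw [hdecomp]; simp
    rw [hd]; exact pvMatchEnd_zipRep_cache z
  refine pvSearchStart_eq low t0.length hp ?_
  intro q hq
  by_contra hbad
  have hbad' : pvMatchEnd (low.drop q) = true := by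
    cases hh : pvMatchEnd (low.drop q)
    · exact absurd hh hbad
    · rfl
  obtain ⟨k, hk | hk⟩ := pvMatchEnd_complete _ hbad'
  · -- a pure zip stack as suffix clashes with the cache suffix
    have hdk : (low.drop q).length = low.length - q := by simp
    rcases k with _ | k'
    · rw [hk] at hdk; simp [pvZipRep] at hdk; omega
    · exact pvCache_zip_clash k' low hc (hk ▸ List.drop_suffix q low)
  · -- zips-then-cache: bounded by the greedy count, so it cannot start left of t0
    have hsplit : low.take q ++ (pvZipRep k ++ ".cache".toList) = low := by
      conv_rhs => rw [← List.take_append_drop q low, hk]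
    have hcancel : low.take q ++ pvZipRep k = t0 ++ pvZipRep z := by
      have h2 : (low.take q ++ pvZipRep k) ++ ".cache".toList
           = (t0 ++ pvZipRep z) ++ ".cache".toList := by
        rw [List.append_assoc, hsplit, hdecomp, List.append_assoc]
      exact List.append_cancel_right h2
    have hkz : k ≤ z := by
      have hsuf : pvZipRep k <:+ t0 ++ pvZipRep z := ⟨low.take q, hcancel⟩
      have := pvZipRep_suffix_le k _ hsuf
      omega
    have hql : (low.take q).length = q := by
      rw [List.length_take]; omega
    have hlens := congrArg List.length hcancel
    simp [pvZipRep_length, hql] at hlens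
    omega

theorem pvSearch_nocache (low t0 : List Char) (z : Nat)
    (hnc : ¬ (".cache".toList <:+ low))
    (hdecomp : low = t0 ++ pvZipRep z)
    (hz : pvZCount low = z) :
    pvSearchStart low = t0.length := by
  have hlen : low.length = t0.length + 4 * z := by
    rw [hdecomp]; simp [pvZipRep_length]
  have hp : pvMatchEnd (low.drop t0.length) = true := by
    have hd : low.drop t0.length = pvZipRep z := by
      rw [hdecomp]; simp
    rw [hd]; exact pvMatchEnd_zipRep z
  refine pvSearchStart_eq low t0.length hp ?_
  intro q hq
  by_contra hbad
  have hbad' : pvMatchEnd (low.drop q) = true := by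
    cases hh : pvMatchEnd (low.drop q)
    · exact absurd hh hbad
    · rfl
  obtain ⟨k, hk | hk⟩ := pvMatchEnd_complete _ hbad'
  · have hsplit : low.take q ++ pvZipRep k = low := by
      conv_rhs => rw [← List.take_append_drop q low, hk]
    have hkz : k ≤ z := by
      have := pvZipRep_suffix_le k low ⟨low.take q, hsplit⟩
      omega
    have hql : (low.take q).length = q := by
      rw [List.length_take]; omega
    have hlens := congrArg List.length hsplit
    simp [pvZipRep_length, hql] at hlens
    omega
  · exact hnc ((List.suffix_append (pvZipRep k) ".cache".toList).trans
      (hk ▸ List.drop_suffix q low))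

-- the while-loop computed as a take of the original characters
theorem pvStripZipLoop_eq (name : String) :
    pvStripZipLoop name =
      String.ofList (name.toList.take
        (name.toList.length - 4 * pvZCount (PySem.Chars.lower name.toList))) := by
  induction name using pvStripZipLoop.induct with
  | case1 name h ih =>
      have hch : PySem.Chars.endswith (PySem.Chars.lower name.toList) ".zip".toList = true := by
        rw [PySem.Str.endswith_eq] at h
        simpa [PySem.Str.toList_lower] using h
      have h4 : 4 ≤ name.toList.length := by
        have := ((PySem.Chars.endswith_iff _ _).mp hch).length_le
        simpa [PySem.Chars.lower] using this
      have hslice : (PySem.Str.slice name none (some (-4))).toList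
          = name.toList.take (name.toList.length - 4) := by
        rw [PySem.Str.toList_slice, PySem.Chars.slice_eq_listSlice,
            PySem.List.slice_to_neg_ofNat _ 4 (by omega)]
      have hlowlen : (PySem.Chars.lower name.toList).length = name.toList.length := by
        simp [PySem.Chars.lower]
      have hlowtake : PySem.Chars.lower (name.toList.take (name.toList.length - 4))
          = (PySem.Chars.lower name.toList).take (name.toList.length - 4) := by
        simp [PySem.Chars.lower, List.map_take]
      have hzc : pvZCount (PySem.Chars.lower name.toList)
          = pvZCount ((PySem.Chars.lower name.toList).take (name.toList.length - 4)) + 1 := by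
        rw [pvZCount, dif_pos hch, hlowlen]
      have hb : 4 * pvZCount ((PySem.Chars.lower name.toList).take (name.toList.length - 4))
          ≤ name.toList.length - 4 := by
        have := pvZCount_bound ((PySem.Chars.lower name.toList).take (name.toList.length - 4))
        rw [List.length_take] at this
        omega
      rw [pvStripZipLoop, dif_pos h, ih, hslice, hlowtake]
      congr 1
      rw [List.take_take, List.length_take, hzc]
      congr 1
      omega
  | case2 name h =>
      have hch : ¬ PySem.Chars.endswith (PySem.Chars.lower name.toList) ".zip".toList = true := by
        rw [PySem.Str.endswith_eq] at h
        simpa [PySem.Str.toList_lower] using h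
      rw [pvStripZipLoop, dif_neg h, pvZCount, dif_neg hch]
      simp only [Nat.mul_zero, Nat.sub_zero, List.take_length, String.ofList_toList]

-- ===== VERDICT (by name: the statement is the Claim_ definition above) =====
-- endswith at the Str level equals endswith of the lowered character list
theorem pvEndsBridge (name : String) (p : String) :
    PySem.Str.endswith (PySem.Str.lower name) p
      = PySem.Chars.endswith (PySem.Chars.lower name.toList) p.toList := by
  rw [PySem.Str.endswith_eq, PySem.Str.toList_lower]

theorem pvLowerLen (name : String) :
    (PySem.Chars.lower name.toList).length = name.toList.length := by
  simp [PySem.Chars.lower]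

theorem pvLowerTake (name : String) (k : Nat) :
    PySem.Chars.lower (name.toList.take k) = (PySem.Chars.lower name.toList).take k := by
  simp [PySem.Chars.lower, List.map_take]

theorem pvSliceTake10 (name : String) :
    (PySem.Str.slice name none (some (-10))).toList
      = name.toList.take (name.toList.length - 10) := by
  rw [PySem.Str.toList_slice, PySem.Chars.slice_eq_listSlice]
  exact PySem.List.slice_to_neg_ofNat name.toList 10 (by omega)

theorem pvSliceTake6 (name : String) :
    (PySem.Str.slice name none (some (-6))).toList
      = name.toList.take (name.toList.length - 6) := by
  rw [PySem.Str.toList_slice, PySem.Chars.slice_eq_listSlice]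
  exact PySem.List.slice_to_neg_ofNat name.toList 6 (by omega)

theorem strip_cache_archive_suffixes_spec : Claim_equal_strip_cache_archive_suffixes := by
  intro name _
  unfold Spec_strip_cache_archive_suffixes
  unfold strip_cache_archive_suffixes strip_cache_archive_suffixes_alt
  simp only []
  by_cases h10 : PySem.Chars.endswith (PySem.Chars.lower name.toList) ".zip.cache".toList = true
  · -- name ends with ".zip.cache" (case-insensitively)
    rw [pvEndsBridge name ".zip.cache", if_pos h10, pvStripZipLoop_eq,
        pvSliceTake10 name, pvLowerTake]
    have hs := (PySem.Chars.endswith_iff _ _).mp h10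
    have h10n : 10 ≤ name.toList.length := by
      have := hs.length_le
      rw [pvLowerLen] at this
      simpa using this
    set cs := name.toList with hcs
    set low := PySem.Chars.lower name.toList with hlowdef
    set n := cs.length with hn
    have hlowlen : low.length = n := pvLowerLen name
    set l' := low.take (n - 10) with hl'
    have hl'len : l'.length = n - 10 := by rw [hl', List.length_take, hlowlen]; omega
    set z := pvZCount l' with hz
    have hb : 4 * z ≤ n - 10 := by
      have := pvZCount_bound l'; rw [hl'len] at this; omega
    set t0 := l'.take (n - 10 - 4 * z) with ht0
    have hdecomp0 : t0 ++ pvZipRep z = l' := by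
      have := pvZCount_decomp l'
      rw [hl'len] at this
      exact this
    have hsplitlow : low = l' ++ ".zip.cache".toList := by
      obtain ⟨t, ht⟩ := hs
      have htl : t.length = n - 10 := by
        have := congrArg List.length ht
        rw [hlowlen] at this
        simp at this
        omega
      have : low.take (n - 10) = t := by
        rw [← ht, ← htl, List.take_left]
      rw [hl', this, ht]
    have hzc10 : (".zip.cache".toList : List Char) = ".zip".toList ++ ".cache".toList := by decide
    have hdecomp : low = t0 ++ pvZipRep (z + 1) ++ ".cache".toList := by
      rw [pvZipRep_snoc]
      calc low = l' ++ ".zip.cache".toList := hsplitlow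
        _ = (t0 ++ pvZipRep z) ++ (".zip".toList ++ ".cache".toList) := by
              rw [hdecomp0, hzc10]
        _ = t0 ++ (pvZipRep z ++ ".zip".toList) ++ ".cache".toList := by
              simp [List.append_assoc]
    have hzsnoc : pvZCount (t0 ++ pvZipRep (z + 1)) = z + 1 := by
      have he : t0 ++ pvZipRep (z + 1) = l' ++ ".zip".toList := by
        rw [pvZipRep_snoc, ← List.append_assoc, hdecomp0]
      rw [he, pvZCount_snoc]
    have hsearch : pvSearchStart low = t0.length :=
      pvSearch_cache low t0 (z + 1) hdecomp hzsnoc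
    have ht0len : t0.length = n - 10 - 4 * z := by
      rw [ht0, List.length_take, hl'len]; omega
    rw [hsearch, ht0len]
    congr 1
    have hcl : (List.take (n - 10) cs).length = n - 10 := by
      rw [List.length_take]; omega
    rw [hcl, List.take_take]
    congr 1
    omega
  · rw [pvEndsBridge name ".zip.cache", if_neg h10]
    by_cases h6 : PySem.Chars.endswith (PySem.Chars.lower name.toList) ".cache".toList = true
    · -- name ends with ".cache" but not ".zip.cache"
      rw [pvEndsBridge name ".cache", if_pos h6, pvStripZipLoop_eq,
          pvSliceTake6 name, pvLowerTake]
      have hs := (PySem.Chars.endswith_iff _ _).mp h6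
      have h6n : 6 ≤ name.toList.length := by
        have := hs.length_le
        rw [pvLowerLen] at this
        simpa using this
      set cs := name.toList with hcs
      set low := PySem.Chars.lower name.toList with hlowdef
      set n := cs.length with hn
      have hlowlen : low.length = n := pvLowerLen name
      set l' := low.take (n - 6) with hl'
      have hl'len : l'.length = n - 6 := by rw [hl', List.length_take, hlowlen]; omega
      set z := pvZCount l' with hz
      have hb : 4 * z ≤ n - 6 := by
        have := pvZCount_bound l'; rw [hl'len] at this; omega
      set t0 := l'.take (n - 6 - 4 * z) with ht0
      have hdecomp0 : t0 ++ pvZipRep z = l' := by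
        have := pvZCount_decomp l'
        rw [hl'len] at this
        exact this
      have hsplitlow : low = l' ++ ".cache".toList := by
        obtain ⟨t, ht⟩ := hs
        have htl : t.length = n - 6 := by
          have := congrArg List.length ht
          rw [hlowlen] at this
          simp at this
          omega
        have : low.take (n - 6) = t := by
          rw [← ht, ← htl, List.take_left]
        rw [hl', this, ht]
      have hdecomp : low = t0 ++ pvZipRep z ++ ".cache".toList := by
        calc low = l' ++ ".cache".toList := hsplitlow
          _ = (t0 ++ pvZipRep z) ++ ".cache".toList := by rw [hdecomp0]
          _ = t0 ++ pvZipRep z ++ ".cache".toList := by simp [List.append_assoc]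
      have hzeq : pvZCount (t0 ++ pvZipRep z) = z := by rw [hdecomp0]
      have hsearch : pvSearchStart low = t0.length :=
        pvSearch_cache low t0 z hdecomp hzeq
      have ht0len : t0.length = n - 6 - 4 * z := by
        rw [ht0, List.length_take, hl'len]; omega
      rw [hsearch, ht0len]
      congr 1
      have hcl : (List.take (n - 6) cs).length = n - 6 := by
        rw [List.length_take]; omega
      rw [hcl, List.take_take]
      congr 1
      omega
    · -- no cache suffix at all
      rw [pvEndsBridge name ".cache", if_neg h6, pvStripZipLoop_eq]
      set cs := name.toList with hcs
      set low := PySem.Chars.lower name.toList with hlowdef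
      set n := cs.length with hn
      have hlowlen : low.length = n := pvLowerLen name
      set z := pvZCount low with hz
      have hb : 4 * z ≤ n := by
        have := pvZCount_bound low; rw [hlowlen] at this; omega
      set t0 := low.take (n - 4 * z) with ht0
      have hdecomp : low = t0 ++ pvZipRep z := by
        have := pvZCount_decomp low
        rw [hlowlen] at this
        exact this.symm
      have hnc : ¬ (".cache".toList <:+ low) := by
        intro hsuf
        exact h6 ((PySem.Chars.endswith_iff _ _).mpr hsuf)
      have hsearch : pvSearchStart low = t0.length :=
        pvSearch_nocache low t0 z hnc hdecomp rfl
      have ht0len : t0.length = n - 4 * z := by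
        rw [ht0, List.length_take, hlowlen]; omega
      rw [hsearch, ht0len]
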